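-- pv_equiv track=rewrite | github.com/alexlalves/FixLinkBot | app.py | is_broken_url
-- ===== SOURCE A (Python) =====
-- from typing import Any, List, Union
--
-- PROBLEM_CHARACTERS = [
--     '_',
--     '*',
--     '~',
--
--     # Questionable?
--     # '%5C',
--     # '))',
-- ]
--
-- def is_broken_url(url: Union[str, Any]) -> bool:
--     if isinstance(url, str):
--         return any(
--             (
--                 url.find(f'\\{char}') != -1
--                 for char in PROBLEM_CHARACTERS
--             )
--         )
--     raise TypeError(f'Expected {url} to be of type str')
-- ===== SOURCE B (Python) =====
-- def is_broken_url(url):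
--     if isinstance(url, str):
--         return any(a == '\\' and b in ('_', '*', '~')
--                    for a, b in zip(url, url[1:]))
--     raise TypeError(f'Expected {url} to be of type str')
-- ===== Notes on version B (the rewrite author's own statement) =====
-- stated objective: alternative
-- what changed: Replaces three separate substring searches (url.find for each escaped problem character) with one left-to-right pass over adjacent character pairs via zip(url, url[1:]).
import Mathlib
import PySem

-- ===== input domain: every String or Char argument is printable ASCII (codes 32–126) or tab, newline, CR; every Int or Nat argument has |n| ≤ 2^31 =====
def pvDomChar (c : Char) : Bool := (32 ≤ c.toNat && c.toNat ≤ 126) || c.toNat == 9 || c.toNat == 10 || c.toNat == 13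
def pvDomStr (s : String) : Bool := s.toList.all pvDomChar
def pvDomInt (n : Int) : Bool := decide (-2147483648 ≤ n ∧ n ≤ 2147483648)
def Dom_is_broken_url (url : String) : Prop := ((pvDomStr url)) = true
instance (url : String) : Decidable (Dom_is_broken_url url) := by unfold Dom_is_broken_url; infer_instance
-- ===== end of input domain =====

-- B replaces A's three separate substring searches with one pass over adjacent character pairs; same result on every string.


-- ===== PORT A =====
def PROBLEM_CHARACTERS : List Char := ['_', '*', '~']

-- any(url.find(f'\\{char}') != -1 for char in PROBLEM_CHARACTERS)
def is_broken_url (url : String) : Bool :=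
  PROBLEM_CHARACTERS.any (fun c => PySem.Str.find url (String.ofList ['\\', c]) != -1)

-- ===== PORT B =====
-- any(a == '\\' and b in ('_', '*', '~') for a, b in zip(url, url[1:]))
def is_broken_url_alt (url : String) : Bool :=
  let l := url.toList
  (l.zip (PySem.List.slice l (some 1) none)).any
    (fun p => p.1 == '\\' && (p.2 == '_' || p.2 == '*' || p.2 == '~'))

-- ===== PRECONDITION & SPEC =====
def Spec_is_broken_url (url : String) (out : Bool) : Prop := out = is_broken_url_alt url
instance (url : String) (out : Bool) : Decidable (Spec_is_broken_url url out) := by unfold Spec_is_broken_url; infer_instance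

-- ===== CLAIM (what is proved, stated in full; the proofs are below) =====
def Claim_equal_is_broken_url : Prop := ∀ (url : String), Dom_is_broken_url url → Spec_is_broken_url url (is_broken_url url)

-- ===== LEMMAS AND PROOFS =====

-- a two-character substring occurs iff some adjacent pair matches it
theorem infix_pair_iff (a b : Char) :
    ∀ (l : List Char), ([a, b] <:+: l) ↔
      ((l.zip l.tail).any (fun p => p.1 == a && p.2 == b) = true)
  | [] => by simp
  | [x] => by
      constructor
      · intro h
        have := h.length_le
        simp at this
      · intro h; simp at h
  | x :: y :: t => by
      rw [List.infix_cons_iff]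
      have ih := infix_pair_iff a b (y :: t)
      simp only [List.tail_cons] at ih
      constructor
      · rintro (hp | hi)
        · rcases hp with ⟨r, hr⟩
          simp at hr
          simp [hr.1, hr.2.1]
        · simp [ih.mp hi]
      · intro h
        simp only [List.tail_cons, List.zip_cons_cons, List.any_cons, Bool.or_eq_true] at h
        rcases h with h | h
        · left
          simp only [Bool.and_eq_true, beq_iff_eq] at h
          exact ⟨t, by simp [h.1, h.2]⟩
        · right
          exact ih.mpr h

-- any over a pointwise disjunction splits
theorem any_orB {α : Type} (l : List α) (p q : α → Bool) :
    l.any (fun x => p x || q x) = (l.any p || l.any q) := by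
  induction l with
  | nil => simp
  | cons x xs ih =>
      simp [ih, Bool.or_assoc, Bool.or_left_comm]

theorem ports_agree (url : String) : is_broken_url url = is_broken_url_alt url := by
  have hpair : ∀ c : Char, (PySem.Str.find url (String.ofList ['\\', c]) != -1) =
      ((url.toList.zip url.toList.tail).any (fun p => p.1 == '\\' && p.2 == c)) := by
    intro c
    rcases h : (url.toList.zip url.toList.tail).any (fun p => p.1 == '\\' && p.2 == c) with _ | _
    · simp only [bne_eq_false_iff_eq]
      rw [PySem.Str.find_eq]
      simp only [String.toList_ofList]
      rw [PySem.Chars.find_eq_neg_one_iff, infix_pair_iff]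
      simp [h]
    · simp only [bne_iff_ne, ne_eq]
      rw [PySem.Str.find_eq]
      simp only [String.toList_ofList]
      rw [← ne_eq, PySem.Chars.find_ne_neg_one_iff, infix_pair_iff]
      simp [h]
  have hsl : PySem.List.slice url.toList (some 1) none = url.toList.tail := by
    cases url.toList <;> simp [PySem.List.slice]
  have hbody : (fun p : Char × Char => p.1 == '\\' && (p.2 == '_' || p.2 == '*' || p.2 == '~'))
      = fun p => (fun p : Char × Char => p.1 == '\\' && p.2 == '_') p
          || ((fun p : Char × Char => p.1 == '\\' && p.2 == '*') p
          || (fun p : Char × Char => p.1 == '\\' && p.2 == '~') p) := by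
    funext p
    cases hb : p.1 == '\\' <;> simp [hb, Bool.and_or_distrib_left, Bool.or_assoc]
  simp only [is_broken_url, is_broken_url_alt, PROBLEM_CHARACTERS]
  rw [hsl]
  simp only [List.any_cons, List.any_nil, hpair, Bool.or_false]
  rw [hbody, any_orB, any_orB]

-- ===== VERDICT (by name: the statement is the Claim_ definition above) =====
theorem is_broken_url_spec : Claim_equal_is_broken_url := by
  intro url _
  unfold Spec_is_broken_url
  exact ports_agree url
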